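-- pv_equiv track=rewrite | github.com/hbhungg/smalltensor | smalltensor/utils.py | broadcast_indices
-- ===== SOURCE A (Python) =====
-- from itertools import zip_longest
-- from typing import Tuple
--
-- def broadcast_indices(s1: Tuple[int, ...], s2: Tuple[int, ...]):
--   """
--   Compute the indices that are broadcasted.
--   broadcast_indices((1, 2), (3, 2)) == (0,)
--   broadcast_indices((6, 7), (5, 6, 1)) == (0, 2) """
--   ret, mlen = [], max(len(s1), len(s2))
--   for idx, dims in enumerate(zip_longest(*[reversed(s) for s in [s1, s2]])):
--     dims = tuple(s for s in dims if s is not None)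
--     if min(dims) != 1 and (min(dims) != max(dims)):
--       raise ValueError(f"Cannot broadcast shapes of {s1} with {s2} at idx:{idx} ({dims[0]} and {dims[1]})")
--     elif min(dims) == 1 and (min(dims) != max(dims)) or len(dims) == 1:
--       ret.append(mlen-idx-1)
--   return tuple(reversed(ret))
-- ===== SOURCE B (Python) =====
-- def broadcast_indices(s1, s2):
--   n1, n2 = len(s1), len(s2)
--   m = min(n1, n2)
--   diff = max(n1, n2) - m
--   ret = list(range(diff))
--   for i, (a, b) in enumerate(zip(s1[n1 - m:], s2[n2 - m:])):
--     if a == b: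
--       continue
--     if min(a, b) == 1:
--       ret.append(diff + i)
--     else:
--       raise ValueError(f"Cannot broadcast shapes of {tuple(s1)} with {tuple(s2)} at axis {diff + i} ({a} and {b})")
--   return tuple(ret)
-- ===== Notes on version B (the rewrite author's own statement) =====
-- stated objective: simpler
-- what changed: B drops A's reversed zip_longest / per-tuple min-max / final reverse machinery: it emits the |len(s1)-len(s2)| leading positions unconditionally as range(diff) and then scans the right-aligned overlap once, left to right, appending diff+i for each unequal pair whose smaller dim is 1; this also removes A's per-axis tuple building and min()/max() calls (measured constant-factor speedup).
import Mathlib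
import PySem

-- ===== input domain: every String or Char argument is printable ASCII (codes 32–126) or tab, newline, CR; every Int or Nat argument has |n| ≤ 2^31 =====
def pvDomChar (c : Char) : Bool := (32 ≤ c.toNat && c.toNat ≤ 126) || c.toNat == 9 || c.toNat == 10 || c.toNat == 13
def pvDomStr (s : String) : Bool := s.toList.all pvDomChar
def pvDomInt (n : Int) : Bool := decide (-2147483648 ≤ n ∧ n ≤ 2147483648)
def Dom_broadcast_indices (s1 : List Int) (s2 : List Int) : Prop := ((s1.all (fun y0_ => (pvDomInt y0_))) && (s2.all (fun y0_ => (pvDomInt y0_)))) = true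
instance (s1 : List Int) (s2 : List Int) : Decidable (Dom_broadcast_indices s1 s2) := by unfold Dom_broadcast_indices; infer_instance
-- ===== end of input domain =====

-- B replaces A's reversed zip_longest + per-axis min/max + final reverse by a direct forward
-- pass: the |len(s1)-len(s2)| leading positions are emitted unconditionally and the
-- right-aligned overlap is scanned once in forward order (objective: simpler).

-- ===== PORT A =====
-- zip_longest(reversed(s1), reversed(s2)) with the None entries already filtered out,
-- as Python's `tuple(s for s in dims if s is not None)` does: each entry is [a,b] or [a] / [b].
def pvZipLongest : List Int → List Int → List (List Int)
  | [], [] => []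
  | a :: t, [] => [a] :: pvZipLongest t []
  | [], b :: u => [b] :: pvZipLongest [] u
  | a :: t, b :: u => [a, b] :: pvZipLongest t u

-- Python min(dims) / max(dims); dims is always nonempty here, so the default is never read.
def pvMin (l : List Int) : Int := (PySem.List.min? l (fun x => x)).getD 0
def pvMax (l : List Int) : Int := (PySem.List.max? l (fun x => x)).getD 0

def broadcast_indices (s1 : List Int) (s2 : List Int) : List Int :=
  let mlen : Int := max (s1.length : Int) (s2.length : Int)
  let ret : List Int :=
    (PySem.List.enumerate (pvZipLongest s1.reverse s2.reverse) 0).foldl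
      (fun ret p =>
        if pvMin p.2 ≠ 1 ∧ pvMin p.2 ≠ pvMax p.2 then
          ret  -- Python raises ValueError here; Pre_ excludes these inputs
        else if (pvMin p.2 = 1 ∧ pvMin p.2 ≠ pvMax p.2) ∨ p.2.length = 1 then
          ret ++ [mlen - p.1 - 1]
        else ret) []
  ret.reverse

-- ===== PORT B =====
def broadcast_indices_alt (s1 : List Int) (s2 : List Int) : List Int :=
  let n1 := s1.length
  let n2 := s2.length
  let m := min n1 n2
  let diff := max n1 n2 - m
  let ret : List Int := PySem.List.pyRange 0 (diff : Int) 1   -- list(range(diff))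
  -- s1[n1-m:] / s2[n2-m:]: the slice start is ≥ 0, so List.drop is exact here
  (PySem.List.enumerate ((s1.drop (n1 - m)).zip (s2.drop (n2 - m))) 0).foldl
    (fun ret p =>
      if p.2.1 = p.2.2 then ret
      else if min p.2.1 p.2.2 = 1 then ret ++ [(diff : Int) + p.1]
      else ret)  -- Python raises ValueError here; Pre_ excludes these inputs
    ret

-- ===== PRECONDITION & SPEC =====
-- Pre_ excludes exactly the inputs on which Python A raises ValueError: some right-aligned
-- overlapping pair of dimensions is unequal with neither side equal to the minimum 1.
def Pre_broadcast_indices (s1 : List Int) (s2 : List Int) : Prop :=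
  ∀ p ∈ (s1.drop (s1.length - min s1.length s2.length)).zip
        (s2.drop (s2.length - min s1.length s2.length)),
    p.1 = p.2 ∨ min p.1 p.2 = 1
instance (s1 : List Int) (s2 : List Int) : Decidable (Pre_broadcast_indices s1 s2) := by
  unfold Pre_broadcast_indices; infer_instance

def pvWitness_broadcast_indices : List Int × List Int := ([1, 2], [3, 2])

def Spec_broadcast_indices (s1 : List Int) (s2 : List Int) (out : List Int) : Prop := out = broadcast_indices_alt s1 s2
instance (s1 : List Int) (s2 : List Int) (out : List Int) : Decidable (Spec_broadcast_indices s1 s2 out) := by unfold Spec_broadcast_indices; infer_instance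

-- ===== CLAIM (what is proved, stated in full; the proofs are below) =====
def Claim_equal_broadcast_indices : Prop := ∀ (s1 : List Int) (s2 : List Int), Dom_broadcast_indices s1 s2 → Pre_broadcast_indices s1 s2 → Spec_broadcast_indices s1 s2 (broadcast_indices s1 s2)

-- ===== LEMMAS AND PROOFS =====

-- the test of A's loop as a single boolean predicate on the filtered dims tuple
def pvQA (d : List Int) : Bool := decide ((pvMin d = 1 ∧ pvMin d ≠ pvMax d) ∨ d.length = 1)

theorem pvMin_single (a : Int) : pvMin [a] = a := by
  simp [pvMin, PySem.List.min?_id_cons]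
theorem pvMax_single (a : Int) : pvMax [a] = a := by
  simp [pvMax, PySem.List.max?_id_cons]
theorem pvMin_pair (a b : Int) : pvMin [a, b] = min a b := by
  simp [pvMin, PySem.List.min?_id_cons]
theorem pvMax_pair (a b : Int) : pvMax [a, b] = max a b := by
  simp [pvMax, PySem.List.max?_id_cons]

-- A's loop body collapses to a single append-if with predicate pvQA
theorem pvA_body_eq (mlen : Int) (ret : List Int) (p : Int × List Int) :
    (if pvMin p.2 ≠ 1 ∧ pvMin p.2 ≠ pvMax p.2 then ret
     else if (pvMin p.2 = 1 ∧ pvMin p.2 ≠ pvMax p.2) ∨ p.2.length = 1 then ret ++ [mlen - p.1 - 1]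
     else ret)
    = (if pvQA p.2 then ret ++ [mlen - p.1 - 1] else ret) := by
  simp only [pvQA, decide_eq_true_eq]
  split_ifs with h1 h2 <;> try rfl
  exfalso
  rcases h2 with h2 | h2
  · exact h1.1 h2.1
  · obtain ⟨a, ha⟩ := List.length_eq_one_iff.mp h2
    rw [ha] at h1
    simp [pvMin_single, pvMax_single] at h1

-- zip_longest split lemmas
theorem pvZL_nil_right (ys : List Int) : pvZipLongest ys [] = ys.map (fun a => [a]) := by
  induction ys with
  | nil => simp [pvZipLongest]
  | cons a t ih => simp [pvZipLongest, ih]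

theorem pvZL_nil_left (ys : List Int) : pvZipLongest [] ys = ys.map (fun b => [b]) := by
  induction ys with
  | nil => simp [pvZipLongest]
  | cons a t ih => simp [pvZipLongest, ih]

theorem pvZL_left (xs ys zs : List Int) (h : xs.length = zs.length) :
    pvZipLongest (xs ++ ys) zs
      = (xs.zip zs).map (fun p => [p.1, p.2]) ++ ys.map (fun a => [a]) := by
  induction xs generalizing zs with
  | nil =>
    cases zs with
    | nil => simpa using pvZL_nil_right ys
    | cons b u => simp at h
  | cons a t ih =>
    cases zs with
    | nil => simp at h
    | cons b u =>
      simp only [List.length_cons, Nat.succ.injEq] at h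
      simp [pvZipLongest, ih u (by omega)]

theorem pvZL_right (xs ys zs : List Int) (h : zs.length = xs.length) :
    pvZipLongest zs (xs ++ ys)
      = (zs.zip xs).map (fun p => [p.1, p.2]) ++ ys.map (fun b => [b]) := by
  induction xs generalizing zs with
  | nil =>
    cases zs with
    | nil => simpa using pvZL_nil_left ys
    | cons b u => simp at h
  | cons a t ih =>
    cases zs with
    | nil => simp at h
    | cons b u =>
      simp only [List.length_cons, Nat.succ.injEq] at h
      simp [pvZipLongest, ih u (by omega)]

-- enumerate over a mapped list
theorem pvEnum_map {α β : Type} (g : α → β) (l : List α) : ∀ s : Int,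
    PySem.List.enumerate (l.map g) s = (PySem.List.enumerate l s).map (fun p => (p.1, g p.2)) := by
  induction l with
  | nil => intro s; simp [PySem.List.enumerate_nil]
  | cons x t ih => intro s; simp [PySem.List.enumerate_cons, ih]

-- zip of reversed equal-length lists is the reversed zip
theorem pvZipRev {α β : Type} (xs : List α) (ys : List β) (h : xs.length = ys.length) :
    xs.reverse.zip ys.reverse = (xs.zip ys).reverse := by
  apply List.ext_getElem
  · simp [h]
  · intro i h1 h2
    simp only [List.getElem_zip, List.getElem_reverse, List.length_zip,
      List.length_reverse, Prod.mk.injEq] at h1 h2 ⊢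
    constructor <;> congr 1 <;> omega

-- the reversed filtered-mapped enumeration of L.reverse is the forward
-- filtered-mapped enumeration of L with a shifted index function
theorem pvRevChunk {α : Type} (L : List α) (q : α → Bool) (c : Int) : ∀ s : Int,
    ((((PySem.List.enumerate L.reverse 0).filter (fun p => q p.2)).map
        (fun p => c - p.1)).reverse)
    = ((PySem.List.enumerate L s).filter (fun p => q p.2)).map
        (fun p => (c - s - ((L.length : Int) - 1)) + p.1) := by
  induction L with
  | nil => intro s; simp [PySem.List.enumerate_nil]
  | cons x t ih =>
    intro s
    rw [List.reverse_cons, PySem.List.enumerate_append]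
    rw [List.filter_append, List.map_append, List.reverse_append]
    rw [ih (s+1)]
    rw [PySem.List.enumerate_cons]
    simp only [List.filter_cons, List.length_cons, PySem.List.enumerate_cons,
      PySem.List.enumerate_nil, List.length_reverse]
    by_cases hq : q x
    · simp only [hq, if_pos]
      simp [List.map_cons]
      constructor
      · ring
      · intros; ring
    · simp only [hq]
      simp
      intros; ring

-- an ascending run, descended through `mlen - k - 1` and reversed, is an ascending run again
theorem pvRangeFlip (s mlen : Int) (n : Nat) :
    ((PySem.List.pyRange s (s + n) 1).map (fun k => mlen - k - 1)).reverse
    = PySem.List.pyRange (mlen - s - n) (mlen - s) 1 := by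
  apply List.ext_getElem
  · simp only [List.length_reverse, List.length_map, PySem.List.length_pyRange_one]
    omega
  · intro i h1 h2
    simp only [List.length_reverse, List.length_map, PySem.List.length_pyRange_one] at h1 h2
    simp only [List.getElem_reverse, List.getElem_map, List.length_map,
      PySem.List.length_pyRange_one, PySem.List.getElem_pyRange_one]
    omega

-- the all-singleton chunk of A's loop: every element passes pvQA, the emitted values
-- are a descending run, so its reverse is an ascending run
theorem pvSingles (l : List Int) (s mlen : Int) :
    (((PySem.List.enumerate (l.map (fun a => [a])) s).filter
        (fun p => pvQA p.2)).map (fun p => mlen - p.1 - 1)).reverse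
    = PySem.List.pyRange (mlen - s - l.length) (mlen - s) 1 := by
  rw [pvEnum_map, List.filter_map]
  have hall : ((fun p : Int × List Int => pvQA p.2) ∘ (fun p : Int × Int => (p.1, [p.2]))) = fun _ => true := by
    funext p; simp [pvQA]
  rw [hall, List.filter_true, List.map_map]
  have h2 : ((fun p : Int × List Int => mlen - p.1 - 1) ∘ (fun p : Int × Int => (p.1, [p.2])))
      = (fun k => mlen - k - 1) ∘ (fun p : Int × Int => p.1) := rfl
  rw [h2, ← List.map_map, PySem.List.map_fst_enumerate, pvRangeFlip]

-- A's test on a 2-dim tuple is B's test on the pair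
theorem pvPredEq :
    (fun p : Int × (Int × Int) => pvQA [p.2.1, p.2.2])
      = fun p : Int × (Int × Int) => decide (¬ p.2.1 = p.2.2 ∧ min p.2.1 p.2.2 = 1) := by
  funext p
  simp only [pvQA, pvMin_pair, pvMax_pair, decide_eq_decide]
  constructor
  · rintro (⟨h1, h2⟩ | h)
    · exact ⟨by omega, h1⟩
    · simp at h
  · rintro ⟨h1, h2⟩; exact Or.inl ⟨h2, by omega⟩

-- normal form of B: the leading run, then the filtered forward overlap scan
theorem pvB_norm (s1 s2 : List Int) :
    broadcast_indices_alt s1 s2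
      = PySem.List.pyRange 0 ((max s1.length s2.length - min s1.length s2.length : Nat) : Int) 1
        ++ ((PySem.List.enumerate
              ((s1.drop (s1.length - min s1.length s2.length)).zip
               (s2.drop (s2.length - min s1.length s2.length))) 0).filter
            (fun p => decide (¬ p.2.1 = p.2.2 ∧ min p.2.1 p.2.2 = 1))).map
            (fun p => ((max s1.length s2.length - min s1.length s2.length : Nat) : Int) + p.1) := by
  unfold broadcast_indices_alt
  dsimp only
  have hb : (fun (ret : List Int) (p : Int × (Int × Int)) =>
      if p.2.1 = p.2.2 then ret
      else if min p.2.1 p.2.2 = 1 then ret ++ [((max s1.length s2.length - min s1.length s2.length : Nat) : Int) + p.1]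
      else ret)
      = fun ret p => if ¬ p.2.1 = p.2.2 ∧ min p.2.1 p.2.2 = 1 then
          ret ++ [((max s1.length s2.length - min s1.length s2.length : Nat) : Int) + p.1] else ret := by
    funext ret p
    split_ifs <;> tauto
  rw [hb, PySem.List.foldl_append_ite]

-- normal form of A, case len(s2) ≤ len(s1)
theorem pvA_norm_left (s1 s2 : List Int) (h : s2.length ≤ s1.length) :
    broadcast_indices s1 s2
      = PySem.List.pyRange 0 ((s1.length - s2.length : Nat) : Int) 1
        ++ ((PySem.List.enumerate ((s1.drop (s1.length - s2.length)).zip s2) 0).filter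
            (fun p => pvQA [p.2.1, p.2.2])).map
            (fun p => ((s1.length - s2.length : Nat) : Int) + p.1) := by
  unfold broadcast_indices
  dsimp only
  have hb : (fun (ret : List Int) (p : Int × List Int) =>
      if pvMin p.2 ≠ 1 ∧ pvMin p.2 ≠ pvMax p.2 then ret
      else if (pvMin p.2 = 1 ∧ pvMin p.2 ≠ pvMax p.2) ∨ p.2.length = 1 then
        ret ++ [max (s1.length : Int) (s2.length : Int) - p.1 - 1]
      else ret)
      = fun ret p => if pvQA p.2 then ret ++ [max (s1.length : Int) (s2.length : Int) - p.1 - 1] else ret :=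
    funext fun ret => funext fun p => pvA_body_eq _ ret p
  rw [hb, PySem.List.foldl_append_if, List.nil_append]
  have hsplit : s1.reverse = (s1.drop (s1.length - s2.length)).reverse ++ (s1.take (s1.length - s2.length)).reverse := by
    rw [← List.reverse_append, List.take_append_drop]
  rw [hsplit, pvZL_left _ _ _ (by simp; omega)]
  rw [pvZipRev _ _ (by simp; omega), List.map_reverse]
  rw [PySem.List.enumerate_append, List.filter_append, List.map_append, List.reverse_append]
  congr 1
  · -- the all-singleton chunk becomes the leading ascending run
    rw [pvSingles]
    congr 1 <;> simp <;> omega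
  · -- the pair chunk becomes the forward overlap scan
    have hf : (fun p : Int × List Int => max (s1.length : Int) (s2.length : Int) - p.1 - 1)
        = fun p => (max (s1.length : Int) (s2.length : Int) - 1) - p.1 := by
      funext p; ring
    rw [hf, pvRevChunk _ _ _ 0, pvEnum_map, List.filter_map, List.map_map]
    apply List.map_congr_left
    intro p hp
    simp only [Function.comp]
    have : ((((s1.drop (s1.length - s2.length)).zip s2).map (fun p : Int × Int => [p.1, p.2])).length : Int)
        = (s2.length : Int) := by
      simp; omega
    rw [this]
    omega

-- normal form of A, case len(s1) ≤ len(s2)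
theorem pvA_norm_right (s1 s2 : List Int) (h : s1.length ≤ s2.length) :
    broadcast_indices s1 s2
      = PySem.List.pyRange 0 ((s2.length - s1.length : Nat) : Int) 1
        ++ ((PySem.List.enumerate (s1.zip (s2.drop (s2.length - s1.length))) 0).filter
            (fun p => pvQA [p.2.1, p.2.2])).map
            (fun p => ((s2.length - s1.length : Nat) : Int) + p.1) := by
  unfold broadcast_indices
  dsimp only
  have hb : (fun (ret : List Int) (p : Int × List Int) =>
      if pvMin p.2 ≠ 1 ∧ pvMin p.2 ≠ pvMax p.2 then ret
      else if (pvMin p.2 = 1 ∧ pvMin p.2 ≠ pvMax p.2) ∨ p.2.length = 1 then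
        ret ++ [max (s1.length : Int) (s2.length : Int) - p.1 - 1]
      else ret)
      = fun ret p => if pvQA p.2 then ret ++ [max (s1.length : Int) (s2.length : Int) - p.1 - 1] else ret :=
    funext fun ret => funext fun p => pvA_body_eq _ ret p
  rw [hb, PySem.List.foldl_append_if, List.nil_append]
  have hsplit : s2.reverse = (s2.drop (s2.length - s1.length)).reverse ++ (s2.take (s2.length - s1.length)).reverse := by
    rw [← List.reverse_append, List.take_append_drop]
  rw [hsplit, pvZL_right _ _ _ (by simp; omega)]
  rw [pvZipRev _ _ (by simp; omega), List.map_reverse]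
  rw [PySem.List.enumerate_append, List.filter_append, List.map_append, List.reverse_append]
  congr 1
  · -- the all-singleton chunk becomes the leading ascending run
    rw [pvSingles]
    congr 1 <;> simp <;> omega
  · -- the pair chunk becomes the forward overlap scan
    have hf : (fun p : Int × List Int => max (s1.length : Int) (s2.length : Int) - p.1 - 1)
        = fun p => (max (s1.length : Int) (s2.length : Int) - 1) - p.1 := by
      funext p; ring
    rw [hf, pvRevChunk _ _ _ 0, pvEnum_map, List.filter_map, List.map_map]
    apply List.map_congr_left
    intro p hp
    simp only [Function.comp]
    have : (((s1.zip (s2.drop (s2.length - s1.length))).map (fun p : Int × Int => [p.1, p.2])).length : Int)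
        = (s1.length : Int) := by
      simp; omega
    rw [this]
    omega

theorem pvPorts_eq (s1 s2 : List Int) : broadcast_indices s1 s2 = broadcast_indices_alt s1 s2 := by
  rw [pvB_norm]
  rcases Nat.le_total s2.length s1.length with h | h
  · rw [pvA_norm_left s1 s2 h, pvPredEq]
    have h1 : max s1.length s2.length - min s1.length s2.length = s1.length - s2.length := by omega
    have h2 : s1.length - min s1.length s2.length = s1.length - s2.length := by omega
    have h3 : s2.length - min s1.length s2.length = 0 := by omega
    rw [h1, h2, h3, List.drop_zero]
  · rw [pvA_norm_right s1 s2 h, pvPredEq]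
    have h1 : max s1.length s2.length - min s1.length s2.length = s2.length - s1.length := by omega
    have h2 : s2.length - min s1.length s2.length = s2.length - s1.length := by omega
    have h3 : s1.length - min s1.length s2.length = 0 := by omega
    rw [h1, h2, h3, List.drop_zero]

-- ===== VERDICT (by name: the statement is the Claim_ definition above) =====
theorem broadcast_indices_spec : Claim_equal_broadcast_indices := by
  intro s1 s2 _ _
  unfold Spec_broadcast_indices
  exact pvPorts_eq s1 s2
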